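-- pv_equiv track=rewrite | github.com/AliceInWonderland61/spring2025-python | Week3/week-3-S1-P2.py | time_required_to_stream
-- ===== SOURCE A (Python) =====
-- def time_required_to_stream(movies,k):
--     #we will keep track of the number ofi terations it takes for the k idex to reach 0, then return it
--     time_counter=0
--
--     while movies[k]>0:
--         for i in range(len(movies)):
--             if movies[i]>0:
--                 movies[i]-=1
--                 time_counter+=1
--             if movies[k]==0:
--                 break
--     return time_counter
-- ===== SOURCE B (Python) =====
-- def time_required_to_stream(movies, k):
--     # Closed form: with v = movies[k], index i contributes min(movies[i], v) if
--     # i <= k (it is served in the final partial round) and min(movies[i], v-1)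
--     # otherwise, clamped at 0.  Does not mutate movies.
--     n = len(movies)
--     kk = k if k >= 0 else k + n
--     v = movies[kk]
--     return sum(max(0, min(x, v if i <= kk else v - 1)) for i, x in enumerate(movies))
-- ===== Notes on version B (the rewrite author's own statement) =====
-- stated objective: alternative
-- what changed: Replaced the simulation of repeated decrement rounds by a one-pass closed-form sum: each index i contributes min(movies[i], v) if i <= k else min(movies[i], v-1), clamped at 0, where v = movies[k]; B also does not mutate the input list (A decrements it in place).
import Mathlib
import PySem

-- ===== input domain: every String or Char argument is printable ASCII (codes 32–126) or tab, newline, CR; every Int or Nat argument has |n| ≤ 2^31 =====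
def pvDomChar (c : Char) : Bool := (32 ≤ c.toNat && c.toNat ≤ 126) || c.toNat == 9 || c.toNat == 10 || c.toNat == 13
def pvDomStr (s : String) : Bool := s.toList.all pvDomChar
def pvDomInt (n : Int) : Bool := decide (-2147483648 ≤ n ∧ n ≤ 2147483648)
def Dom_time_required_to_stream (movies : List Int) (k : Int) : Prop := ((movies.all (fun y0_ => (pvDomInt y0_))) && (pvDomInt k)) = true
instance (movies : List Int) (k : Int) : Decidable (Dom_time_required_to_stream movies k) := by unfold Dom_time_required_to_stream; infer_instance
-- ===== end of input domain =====

-- B replaces A's round-by-round decrement simulation by a one-pass closed-form sum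
-- (a different algorithm, not claimed faster); A mutates the input list in place, B
-- does not — the equivalence proved is about the return value only.

-- ===== PORT A =====
-- inner 'for i in range(len(movies))' loop of A, starting at index i; returns the
-- updated list and counter, stopping early at the 'break' exactly as the Python does.
def pvForA (m : List Int) (kn : Nat) (cnt : Int) (i : Nat) : List Int × Int :=
  if h : i < m.length then
    let v := m.getD i 0
    let m1 := if v > 0 then m.set i (v - 1) else m
    let c1 := if v > 0 then cnt + 1 else cnt
    if m1.getD kn 0 = 0 then (m1, c1) else pvForA m1 kn c1 (i + 1)
  else (m, cnt)
termination_by m.length - i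
decreasing_by
  split <;> first | (rw [List.length_set]; omega) | omega

-- the outer 'while movies[k] > 0' loop; the fuel only makes the recursion total, it is
-- chosen large enough (the initial movies[k]) that it is never exhausted on Pre_.
def pvWhileA : Nat → List Int → Nat → Int → Int
  | 0, _, _, cnt => cnt
  | fuel + 1, m, kn, cnt =>
    if m.getD kn 0 > 0 then
      let r := pvForA m kn cnt 0
      pvWhileA fuel r.1 kn r.2
    else cnt

def time_required_to_stream (movies : List Int) (k : Int) : Int :=
  match PySem.List.pyGet? movies k with
  | none => 0  -- Python raises IndexError here; excluded by Pre_
  | some v => pvWhileA v.toNat movies ((if k < 0 then k + movies.length else k).toNat) 0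

-- ===== PORT B =====
def time_required_to_stream_alt (movies : List Int) (k : Int) : Int :=
  let n : Int := movies.length
  let kk : Int := if k ≥ 0 then k else k + n
  match PySem.List.pyGet? movies kk with
  | none => 0  -- Python raises IndexError here; excluded by Pre_
  | some v =>
    (PySem.List.enumerate movies).foldl
      (fun acc p => acc + max 0 (min p.2 (if p.1 ≤ kk then v else v - 1))) 0

-- ===== PRECONDITION & SPEC =====
-- Pre_ excludes exactly the out-of-range indices k, on which A's 'movies[k]' raises IndexError.
def Pre_time_required_to_stream (movies : List Int) (k : Int) : Prop :=
  PySem.Raise.InRange movies.length k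
instance (movies : List Int) (k : Int) : Decidable (Pre_time_required_to_stream movies k) := by
  unfold Pre_time_required_to_stream; infer_instance

def pvWitness_time_required_to_stream : List Int × Int := ([2, 5, 1, 3], 1)

def Spec_time_required_to_stream (movies : List Int) (k : Int) (out : Int) : Prop := out = time_required_to_stream_alt movies k
instance (movies : List Int) (k : Int) (out : Int) : Decidable (Spec_time_required_to_stream movies k out) := by unfold Spec_time_required_to_stream; infer_instance

-- ===== CLAIM (what is proved, stated in full; the proofs are below) =====
def Claim_equal_time_required_to_stream : Prop := ∀ (movies : List Int) (k : Int), Dom_time_required_to_stream movies k → Pre_time_required_to_stream movies k → Spec_time_required_to_stream movies k (time_required_to_stream movies k)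

-- ===== LEMMAS AND PROOFS =====

-- one round of A decrements every positive entry by one
def pvDec1 (x : Int) : Int := if x > 0 then x - 1 else x

-- integer count of positive entries
def pvCntPos : List Int → Int
  | [] => 0
  | x :: r => (if 0 < x then 1 else 0) + pvCntPos r

-- the closed-form sum of B, as a structural recursion (i = index of the head)
def pvG (v : Int) (kn : Nat) : Nat → List Int → Int
  | _, [] => 0
  | i, x :: r => max 0 (min x (if i ≤ kn then v else v - 1)) + pvG v kn (i + 1) r

theorem pvG_nonpos (v : Int) (kn : Nat) (hv : v ≤ 0) :
    ∀ (i : Nat) (m : List Int), pvG v kn i m = 0 := by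
  intro i m
  induction m generalizing i with
  | nil => simp [pvG]
  | cons x r ih => simp only [pvG, ih]; split <;> omega

theorem pvG_one (kn : Nat) : ∀ (i : Nat) (m : List Int),
    pvG 1 kn i m = pvCntPos (m.take (kn + 1 - i)) := by
  intro i m
  induction m generalizing i with
  | nil => simp [pvG, pvCntPos]
  | cons x r ih =>
    simp only [pvG, ih]
    by_cases h : i ≤ kn
    · have h1 : kn + 1 - i = (kn - i) + 1 := by omega
      have h2 : kn + 1 - (i + 1) = kn - i := by omega
      rw [h1, h2]
      simp only [List.take_succ_cons, pvCntPos]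
      split <;> omega
    · have h1 : kn + 1 - i = 0 := by omega
      have h2 : kn + 1 - (i + 1) = 0 := by omega
      rw [h1, h2]
      simp only [List.take_zero, pvCntPos]
      split <;> omega

theorem pvG_step (v : Int) (kn : Nat) (hv : 1 < v) : ∀ (i : Nat) (m : List Int),
    pvG v kn i m = pvCntPos m + pvG (v - 1) kn i (m.map pvDec1) := by
  intro i m
  induction m generalizing i with
  | nil => simp [pvG, pvCntPos]
  | cons x r ih =>
    simp only [pvG, pvCntPos, List.map_cons, ih]
    have : max 0 (min x (if i ≤ kn then v else v - 1)) =
        (if 0 < x then 1 else 0) +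
          max 0 (min (pvDec1 x) (if i ≤ kn then v - 1 else v - 1 - 1)) := by
      unfold pvDec1; split <;> split <;> omega
    omega

-- getD at kn after the conditional set at i
theorem pvSet_getD (m : List Int) (i kn : Nat) (hkn : kn < m.length) (a : Int) :
    (m.set i a).getD kn 0 = if i = kn then (if i < m.length then a else m.getD kn 0) else m.getD kn 0 := by
  split
  · rename_i h; subst h
    split
    · rw [List.getD_eq_getElem?_getD, List.getElem?_set_self (by omega)]
      simp [List.getD_eq_getElem?_getD]
    · omega
  · rename_i h
    rw [List.getD_eq_getElem?_getD, List.getElem?_set_ne (by omega)]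
    simp [List.getD_eq_getElem?_getD]

-- pass with no break: the value at kn stays positive throughout, so the whole suffix
-- from i is decremented and every positive entry is counted.
theorem pvForA_full (kn : Nat) : ∀ (m : List Int) (cnt : Int) (i : Nat),
    kn < m.length → (i ≤ kn → 1 < m.getD kn 0) → (kn < i → 0 < m.getD kn 0) →
    pvForA m kn cnt i = (m.take i ++ (m.drop i).map pvDec1, cnt + pvCntPos (m.drop i)) := by
  intro m cnt i
  induction m, cnt, i using pvForA.induct kn with
  | case1 m cnt i hlt v m1 hbrk =>
    intro hkn h1 h2
    exfalso
    simp only [m1, v, dite_eq_ite] at hbrk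
    by_cases hpos : m.getD i 0 > 0
    · rw [if_pos hpos, pvSet_getD m i kn hkn] at hbrk
      by_cases hik : i = kn
      · subst hik
        rw [if_pos rfl, if_pos hlt] at hbrk
        have := h1 (le_refl i); omega
      · rw [if_neg hik] at hbrk
        by_cases hle : i ≤ kn
        · have := h1 hle; omega
        · have := h2 (by omega); omega
    · rw [if_neg hpos] at hbrk
      by_cases hle : i ≤ kn
      · have := h1 hle; omega
      · have := h2 (by omega); omega
  | case2 m cnt i hlt v m1 c1 hbrk ih =>
    intro hkn h1 h2
    simp only [m1, v, dite_eq_ite] at hbrk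
    simp only [m1, c1, v, dite_eq_ite] at ih
    -- the element at i
    have hsplit : m = m.take i ++ m[i] :: m.drop (i + 1) := by
      conv_lhs => rw [← List.take_append_drop i m, List.drop_eq_getElem_cons hlt]
    have hgetd : m.getD i 0 = m[i] := List.getD_eq_getElem m 0 hlt
    have htklen : (m.take i).length = i := by simp; omega
    -- the list after the body of iteration i, in split form
    have hm1 : (if m.getD i 0 > 0 then m.set i (m.getD i 0 - 1) else m)
        = m.take i ++ pvDec1 m[i] :: m.drop (i + 1) := by
      unfold pvDec1
      rw [hgetd]
      split
      · rw [List.set_eq_take_append_cons_drop]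
        simp [hlt]
      · exact hsplit
    rw [pvForA]
    simp only [dif_pos hlt]
    rw [if_neg hbrk]
    -- establish the IH's hypotheses
    have hlen1 : (if m.getD i 0 > 0 then m.set i (m.getD i 0 - 1) else m).length = m.length := by
      split <;> simp
    have hknval : (if m.getD i 0 > 0 then m.set i (m.getD i 0 - 1) else m).getD kn 0
        = if i = kn then pvDec1 m[i] else m.getD kn 0 := by
      by_cases hik : i = kn
      · subst hik
        rw [if_pos rfl]
        unfold pvDec1
        rw [← hgetd]
        by_cases hv : m.getD i 0 > 0
        · rw [if_pos hv, if_pos hv, pvSet_getD m i i hkn, if_pos rfl, if_pos hlt]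
        · rw [if_neg hv, if_neg hv]
      · rw [if_neg hik]
        by_cases hv : m.getD i 0 > 0
        · rw [if_pos hv, pvSet_getD m i kn hkn, if_neg hik]
        · rw [if_neg hv]
    have ihh := ih (by rw [hlen1]; exact hkn)
      (by intro hle
          rw [hknval, if_neg (by omega)]
          exact h1 (by omega))
      (by intro hgt
          rw [hknval]
          by_cases hik : i = kn
          · rw [if_pos hik]
            have := h1 (by omega)
            subst hik
            unfold pvDec1
            rw [← hgetd]
            split <;> omega
          · rw [if_neg hik]
            exact h2 (by omega))
    rw [ihh, hm1]
    -- assemble both components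
    have htk : (m.take i ++ pvDec1 m[i] :: m.drop (i + 1)).take (i + 1)
        = m.take i ++ [pvDec1 m[i]] := by
      rw [List.take_append, htklen]
      have h1 : i + 1 - i = 1 := by omega
      rw [h1, List.take_of_length_le (le_trans (le_of_eq htklen) (by omega))]
      simp
    have hdp : (m.take i ++ pvDec1 m[i] :: m.drop (i + 1)).drop (i + 1)
        = m.drop (i + 1) := by
      rw [List.drop_append, htklen]
      have h1 : i + 1 - i = 1 := by omega
      rw [h1, List.drop_of_length_le (le_trans (le_of_eq htklen) (by omega))]
      simp
    rw [htk, hdp]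
    have hdropm : m.drop i = m[i] :: m.drop (i + 1) := List.drop_eq_getElem_cons hlt
    rw [Prod.mk.injEq]
    constructor
    · rw [hdropm]
      simp only [List.map_cons, List.cons_append, List.append_assoc]
      simp
    · rw [hdropm]
      simp only [pvCntPos, ← hgetd]
      by_cases hv : m.getD i 0 > 0
      · rw [if_pos hv, if_pos hv]; ring
      · rw [if_neg hv, if_neg hv]; ring
  | case3 m cnt i hge =>
    intro hkn h1 h2
    have hnil : m.drop i = [] := List.drop_eq_nil_of_le (by omega)
    rw [pvForA, dif_neg hge]
    rw [hnil, List.take_of_length_le (by omega)]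
    simp [pvCntPos]

-- pass ending in the break: the value at kn is 1, indices i..kn are served, the kn-th
-- entry becomes 0 and the loop breaks there.
theorem pvForA_break (kn : Nat) : ∀ (m : List Int) (cnt : Int) (i : Nat),
    i ≤ kn → kn < m.length → m.getD kn 0 = 1 →
    (pvForA m kn cnt i).1.length = m.length ∧
    (pvForA m kn cnt i).1.getD kn 0 = 0 ∧
    (pvForA m kn cnt i).2 = cnt + pvCntPos ((m.drop i).take (kn + 1 - i)) := by
  intro m cnt i
  induction m, cnt, i using pvForA.induct kn with
  | case1 m cnt i hlt v m1 hbrk =>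
    intro hik hkn hone
    simp only [m1, v, dite_eq_ite] at hbrk
    have hgetd : m.getD i 0 = m[i] := List.getD_eq_getElem m 0 hlt
    have hieq : i = kn := by
      by_contra hne
      by_cases hpos : m.getD i 0 > 0
      · rw [if_pos hpos, pvSet_getD m i kn hkn, if_neg hne] at hbrk
        omega
      · rw [if_neg hpos] at hbrk; omega
    subst hieq
    have hpos : m.getD i 0 > 0 := by omega
    rw [pvForA]
    simp only [dif_pos hlt]
    rw [if_pos (by simpa only [if_pos hpos] using hbrk)]
    refine ⟨?_, ?_, ?_⟩
    · rw [if_pos hpos]; simp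
    · simpa only [if_pos hpos] using hbrk
    · rw [if_pos hpos]
      have h1 : i + 1 - i = 1 := by omega
      rw [h1]
      have hdropm : m.drop i = m[i] :: m.drop (i + 1) := List.drop_eq_getElem_cons hlt
      rw [hdropm]
      simp only [List.take_succ_cons, List.take_zero, pvCntPos]
      rw [← hgetd]
      split <;> omega
  | case2 m cnt i hlt v m1 c1 hbrk ih =>
    intro hik hkn hone
    simp only [m1, v, dite_eq_ite] at hbrk
    simp only [m1, c1, v, dite_eq_ite] at ih
    have hgetd : m.getD i 0 = m[i] := List.getD_eq_getElem m 0 hlt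
    have hne : i ≠ kn := by
      intro h; subst h
      have hpos : m.getD i 0 > 0 := by omega
      rw [if_pos hpos, pvSet_getD m i i hkn, if_pos rfl, if_pos hlt] at hbrk
      omega
    have hknval : (if m.getD i 0 > 0 then m.set i (m.getD i 0 - 1) else m).getD kn 0 = 1 := by
      split
      · rw [pvSet_getD m i kn hkn, if_neg hne]; exact hone
      · exact hone
    have hlen1 : (if m.getD i 0 > 0 then m.set i (m.getD i 0 - 1) else m).length = m.length := by
      split <;> simp
    have hdrop1 : (if m.getD i 0 > 0 then m.set i (m.getD i 0 - 1) else m).drop (i + 1)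
        = m.drop (i + 1) := by
      split
      · simp [List.drop_set]
      · rfl
    rw [pvForA]
    simp only [dif_pos hlt]
    rw [if_neg hbrk]
    obtain ⟨ih1, ih2, ih3⟩ := ih (by omega) (by rw [hlen1]; exact hkn) hknval
    refine ⟨by rw [ih1, hlen1], ih2, ?_⟩
    rw [ih3, hdrop1]
    have hdropm : m.drop i = m[i] :: m.drop (i + 1) := List.drop_eq_getElem_cons hlt
    have h1 : kn + 1 - i = (kn + 1 - (i + 1)) + 1 := by omega
    rw [hdropm, h1]
    simp only [List.take_succ_cons, pvCntPos]
    rw [← hgetd]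
    split <;> ring
  | case3 m cnt i hge =>
    intro hik hkn hone
    omega

-- the outer loop computes the closed-form sum, given enough fuel
theorem pvWhileA_eq (kn : Nat) : ∀ (fuel : Nat) (m : List Int) (cnt : Int),
    kn < m.length → (m.getD kn 0).toNat ≤ fuel →
    pvWhileA fuel m kn cnt = cnt + pvG (m.getD kn 0) kn 0 m := by
  intro fuel
  induction fuel with
  | zero =>
    intro m cnt hkn hfuel
    rw [pvWhileA, pvG_nonpos _ _ (by omega)]
    ring
  | succ f ih =>
    intro m cnt hkn hfuel
    rw [pvWhileA]
    by_cases hV : m.getD kn 0 > 0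
    · rw [if_pos hV]
      by_cases hV1 : m.getD kn 0 = 1
      · obtain ⟨hb1, hb2, hb3⟩ := pvForA_break kn m cnt 0 (Nat.zero_le kn) hkn hV1
        rw [ih _ _ (by rw [hb1]; exact hkn) (by rw [hb2]; simp), hb2,
            pvG_nonpos _ _ (by omega), hb3, hV1, pvG_one]
        simp
      · have hV2 : 1 < m.getD kn 0 := by omega
        rw [pvForA_full kn m cnt 0 hkn (fun _ => hV2) (by omega)]
        simp only [List.take_zero, List.drop_zero, List.nil_append]
        have hmap : (m.map pvDec1).getD kn 0 = m.getD kn 0 - 1 := by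
          rw [List.getD_eq_getElem?_getD, List.getElem?_map]
          rw [List.getElem?_eq_getElem hkn]
          simp only [Option.map_some, Option.getD_some]
          rw [List.getD_eq_getElem m 0 hkn]
          unfold pvDec1
          rw [if_pos (by rw [← List.getD_eq_getElem m 0 hkn]; omega)]
        rw [ih _ _ (by simp [hkn]) (by rw [hmap]; omega), hmap,
            pvG_step _ _ hV2 0 m]
        ring
    · rw [if_neg hV, pvG_nonpos _ _ (by omega)]
      ring

-- Python indexing: pyGet? in terms of the normalised index
theorem pvPyGet_norm (xs : List Int) (k : Int)
    (h1 : -(xs.length : Int) ≤ k) (h2 : k < xs.length) :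
    PySem.List.pyGet? xs k = some (xs.getD ((if k < 0 then k + xs.length else k).toNat) 0) := by
  by_cases hk : k < 0
  · have hj : k = -(((-k).toNat : Nat) : Int) := by omega
    rw [if_pos hk, hj, PySem.List.pyGet?_neg_natCast _ _ (by omega) (by omega)]
    have hlt : xs.length - (-k).toNat < xs.length := by omega
    rw [List.getElem?_eq_getElem hlt]
    have : (-(((-k).toNat : Nat) : Int) + xs.length).toNat = xs.length - (-k).toNat := by omega
    rw [this, List.getD_eq_getElem xs 0 hlt]
  · rw [if_neg hk, PySem.List.pyGet?_of_nonneg xs (by omega)]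
    have hlt : k.toNat < xs.length := by omega
    rw [List.getElem?_eq_getElem hlt, List.getD_eq_getElem xs 0 hlt]

-- B's fold over enumerate equals the structural sum pvG
theorem pvFold_eq (v : Int) (kn : Nat) : ∀ (m : List Int) (s : Nat) (acc : Int),
    (PySem.List.enumerate m (s : Int)).foldl
      (fun acc p => acc + max 0 (min p.2 (if p.1 ≤ (kn : Int) then v else v - 1))) acc
    = acc + pvG v kn s m := by
  intro m
  induction m with
  | nil => intro s acc; simp [PySem.List.enumerate_nil, pvG]
  | cons x r ih =>
    intro s acc
    rw [PySem.List.enumerate_cons]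
    simp only [List.foldl_cons]
    have hcast : ((s : Int) + 1) = ((s + 1 : Nat) : Int) := by push_cast; ring
    rw [hcast, ih]
    simp only [pvG, Nat.cast_le]
    ring

-- ===== VERDICT (by name: the statement is the Claim_ definition above) =====
theorem time_required_to_stream_spec : Claim_equal_time_required_to_stream := by
  intro movies k _ hpre
  unfold Spec_time_required_to_stream
  have hrange : -(movies.length : Int) ≤ k ∧ k < movies.length := by
    simpa [PySem.Raise.InRange] using hpre
  obtain ⟨h1, h2⟩ := hrange
  have hget := pvPyGet_norm movies k h1 h2
  set kn : Nat := (if k < 0 then k + movies.length else k).toNat with hkn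
  have hknlt : kn < movies.length := by
    rw [hkn]; split <;> omega
  have hkk : (if k ≥ 0 then k else k + (movies.length : Int)) = (kn : Int) := by
    rw [hkn]; split <;> split <;> omega
  have hget2 : PySem.List.pyGet? movies ((kn : Nat) : Int) = some (movies.getD kn 0) := by
    rw [PySem.List.pyGet?_natCast, List.getElem?_eq_getElem hknlt,
        List.getD_eq_getElem movies 0 hknlt]
  have hfold0 : ∀ v : Int, (PySem.List.enumerate movies).foldl
      (fun acc p => acc + max 0 (min p.2 (if p.1 ≤ (kn : Int) then v else v - 1))) 0
      = pvG v kn 0 movies := by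
    intro v
    simpa using pvFold_eq v kn movies 0 0
  unfold time_required_to_stream time_required_to_stream_alt
  simp only [hkk, hget, hget2]
  rw [pvWhileA_eq kn _ movies 0 hknlt (le_refl _), hfold0]
  simp
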